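-- pv_equiv track=rewrite | github.com/dollyishere/baek- | 프로그래머스/0/120869. 외계어 사전/외계어 사전.py | solution
-- ===== SOURCE A (Python) =====
-- from copy import deepcopy
--
-- def solution(spell, dic):
--     answer = 2
--     check_spell = dict()
--
--     for s in spell:
--         check_spell[s] = 0
--
--     for now_dict in dic:
--         now_check = deepcopy(check_spell)
--
--         for d in now_dict:
--             if d not in spell:
--                 break
--             elif now_check[d] >= 1:
--                 break
--             else:
--                 now_check[d] += 1
--
--         if sum(now_check.values()) == len(spell):
--             answer = 1
--
--     return answer
-- ===== SOURCE B (Python) =====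
-- def solution(spell, dic):
--     n = len(spell)
--     sset = set(spell)
--     if len(sset) != n:
--         return 2
--     answer = 2
--     for word in dic:
--         if len(word) >= n and set(word[:n]) == sset:
--             answer = 1
--     return answer
-- ===== Notes on version B (the rewrite author's own statement) =====
-- stated objective: simpler
-- what changed: Replaces the per-word dict deepcopy and stateful break-out counting loop by a single prefix-set comparison: a word matches iff its first len(spell) characters are a permutation of spell, with an upfront guard that spell has no duplicates (otherwise no word can ever match).
import Mathlib
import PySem

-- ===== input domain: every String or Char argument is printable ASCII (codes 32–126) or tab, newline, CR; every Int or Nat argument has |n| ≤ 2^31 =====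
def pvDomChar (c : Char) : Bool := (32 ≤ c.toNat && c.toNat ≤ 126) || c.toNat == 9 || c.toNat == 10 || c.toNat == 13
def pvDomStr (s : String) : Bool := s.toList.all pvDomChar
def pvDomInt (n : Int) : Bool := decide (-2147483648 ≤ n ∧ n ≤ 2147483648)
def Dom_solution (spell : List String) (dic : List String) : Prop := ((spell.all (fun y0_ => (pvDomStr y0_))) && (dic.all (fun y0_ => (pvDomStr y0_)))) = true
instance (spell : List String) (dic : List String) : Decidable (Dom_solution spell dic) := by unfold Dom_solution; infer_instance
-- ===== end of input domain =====

-- B replaces A's per-word dict-copy/counting loop by a single prefix-set comparison (objective: simpler).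

-- ===== PORT A =====
-- inner 'for d in now_dict: …' loop of A (break → return the dict as is)
def solutionInner (spell : List String) : PySem.Dict String Int → List Char → PySem.Dict String Int
  | ck, [] => ck
  | ck, c :: rest =>
    let d := String.mk [c]
    if ¬ (spell.contains d = true) then ck
    else if (1 : Int) ≤ ck.getD d 0 then ck
    else solutionInner spell (ck.insert d (ck.getD d 0 + 1)) rest

def solution (spell : List String) (dic : List String) : Int :=
  let check_spell := spell.foldl (fun d s => d.insert s (0 : Int)) PySem.Dict.empty
  dic.foldl (fun answer w =>
    let now_check := solutionInner spell check_spell w.toList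
    if now_check.values.sum = (spell.length : Int) then 1 else answer) 2

-- ===== PORT B =====
def solution_alt (spell : List String) (dic : List String) : Int :=
  let n := spell.length
  let sset : PySem.Set String := PySem.Set.ofList spell
  if sset.length ≠ n then 2
  else dic.foldl (fun answer w =>
    if n ≤ w.toList.length ∧
       PySem.Set.equal (PySem.Set.ofList ((w.toList.take n).map (fun c => String.mk [c]))) sset = true
    then 1 else answer) 2

-- ===== PRECONDITION & SPEC =====
def Spec_solution (spell : List String) (dic : List String) (out : Int) : Prop := out = solution_alt spell dic
instance (spell : List String) (dic : List String) (out : Int) : Decidable (Spec_solution spell dic out) := by unfold Spec_solution; infer_instance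

-- ===== CLAIM (what is proved, stated in full; the proofs are below) =====
def Claim_equal_solution : Prop := ∀ (spell : List String) (dic : List String), Dom_solution spell dic → Spec_solution spell dic (solution spell dic)

-- ===== LEMMAS AND PROOFS =====

-- greedy marked set: the keys A's inner loop sets to 1, as a list (proof-side model)
def gp (spell : List String) (M : List String) : List Char → List String
  | [] => M
  | c :: rest =>
    let s := String.mk [c]
    if s ∈ spell ∧ s ∉ M then gp spell (M ++ [s]) rest else M

theorem gp_nodup (spell M : List String) (cs : List Char) (h : M.Nodup) :
    (gp spell M cs).Nodup := by
  induction cs generalizing M with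
  | nil => exact h
  | cons c rest ih =>
    simp only [gp]
    split
    · next hc => refine ih _ (by rw [List.nodup_append]; exact ⟨h, by simp, by intro a ha; simp; rintro rfl; exact hc.2 ha⟩)
    · exact h

theorem gp_mem (spell M : List String) (cs : List Char) (x : String)
    (hx : x ∈ gp spell M cs) : x ∈ M ∨ x ∈ spell := by
  induction cs generalizing M with
  | nil => exact Or.inl hx
  | cons c rest ih =>
    simp only [gp] at hx
    split at hx
    · next hc =>
      rcases ih _ hx with h | h
      · rcases List.mem_append.mp h with h | h
        · exact Or.inl h
        · simp at h; subst h; exact Or.inr hc.1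
      · exact Or.inr h
    · exact Or.inl hx

theorem gp_prefix (spell : List String) (cs : List Char) : ∀ M : List String,
    ∃ k, k ≤ cs.length ∧ gp spell M cs = M ++ ((cs.take k).map (fun c => String.mk [c])) := by
  induction cs with
  | nil => intro M; exact ⟨0, by simp [gp]⟩
  | cons c rest ih =>
    intro M
    simp only [gp]
    split
    · obtain ⟨k, hk, he⟩ := ih (M ++ [String.mk [c]])
      exact ⟨k + 1, by simpa using hk, by simp [he]⟩
    · exact ⟨0, by simp⟩

theorem gp_run (spell : List String) (cs1 : List Char) : ∀ (cs2 : List Char) (M : List String),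
    (∀ c ∈ cs1, String.mk [c] ∈ spell) →
    (M ++ cs1.map (fun c => String.mk [c])).Nodup →
    gp spell M (cs1 ++ cs2) = gp spell (M ++ cs1.map (fun c => String.mk [c])) cs2 := by
  induction cs1 with
  | nil => intro cs2 M _ _; simp
  | cons c rest ih =>
    intro cs2 M hs hnd
    have hmem : String.mk [c] ∈ spell := hs c (by simp)
    have hnotM : String.mk [c] ∉ M := by
      intro h
      have hd := (List.nodup_append.mp hnd).2.2
      exact hd (String.mk [c]) h (String.mk [c]) (by simp) rfl
    simp only [List.cons_append, gp]
    rw [if_pos (show String.mk [c] ∈ spell ∧ String.mk [c] ∉ M from ⟨hmem, hnotM⟩)]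
    rw [ih cs2 (M ++ [String.mk [c]]) (fun d hd => hs d (by simp [hd])) (by simpa using hnd)]
    simp

theorem gp_stuck (spell M : List String) (cs : List Char)
    (h : ∀ s ∈ spell, s ∈ M) : gp spell M cs = M := by
  cases cs with
  | nil => rfl
  | cons c rest =>
    simp only [gp]
    rw [if_neg]
    rintro ⟨h1, h2⟩
    exact h2 (h _ h1)

-- the initial dict: keys = set(spell), all values 0
theorem check_getD (l : List String) : ∀ (d : PySem.Dict String Int),
    (∀ k, d.getD k 0 = 0) →
    ∀ k, (l.foldl (fun d s => d.insert s (0 : Int)) d).getD k 0 = 0 := by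
  induction l with
  | nil => intro d h k; exact h k
  | cons s rest ih =>
    intro d h k
    simp only [List.foldl_cons]
    refine ih _ (fun k' => ?_) k
    rw [PySem.Dict.getD_insert]
    split <;> simp [h]

-- characterization of A's inner loop
theorem solutionInner_spec (spell : List String) (cs : List Char) :
    ∀ (M : List String) (d : PySem.Dict String Int),
    d.keys = PySem.Set.ofList spell →
    (∀ k, d.getD k 0 = if k ∈ M then (1 : Int) else 0) →
    (solutionInner spell d cs).keys = d.keys ∧
    (∀ k, (solutionInner spell d cs).getD k 0 = if k ∈ gp spell M cs then (1 : Int) else 0) := by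
  induction cs with
  | nil => intro M d hk hv; exact ⟨rfl, by simpa [gp] using hv⟩
  | cons c rest ih =>
    intro M d hk hv
    simp only [solutionInner]
    split
    · next hns =>
      have hsp : String.mk [c] ∉ spell := by simpa using hns
      have hgp : gp spell M (c :: rest) = M := by
        simp only [gp]; rw [if_neg (by tauto)]
      rw [hgp]
      exact ⟨rfl, by simpa using hv⟩
    · next hns =>
      have hsp : String.mk [c] ∈ spell := by
        have := not_not.mp hns
        simpa using this
      split
      · next hge =>
        have hM : String.mk [c] ∈ M := by
          rw [hv] at hge
          by_contra h
          rw [if_neg h] at hge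
          omega
        have hgp : gp spell M (c :: rest) = M := by
          simp only [gp]; rw [if_neg (by tauto)]
        rw [hgp]
        exact ⟨rfl, by simpa using hv⟩
      · next hge =>
        have hM : String.mk [c] ∉ M := by
          intro h
          exact hge (by rw [hv, if_pos h])
        have hgp : gp spell M (c :: rest) = gp spell (M ++ [String.mk [c]]) rest := by
          simp only [gp]
          rw [if_pos (show String.mk [c] ∈ spell ∧ String.mk [c] ∉ M from ⟨hsp, hM⟩)]
        rw [hgp]
        have hcont : d.contains (String.mk [c]) = true := by
          rw [PySem.Dict.contains_iff_mem_keys, hk, PySem.Set.mem_ofList]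
          exact hsp
        have hk' : (d.insert (String.mk [c]) (d.getD (String.mk [c]) 0 + 1)).keys = d.keys :=
          PySem.Dict.keys_insert_of_contains d _ hcont
        have hv' : ∀ k, (d.insert (String.mk [c]) (d.getD (String.mk [c]) 0 + 1)).getD k 0 =
            if k ∈ M ++ [String.mk [c]] then (1 : Int) else 0 := by
          intro k
          rw [PySem.Dict.getD_insert]
          by_cases hks : k = String.mk [c]
          · subst hks
            rw [if_pos rfl, hv, if_neg hM, if_pos (by simp)]
            norm_num
          · rw [if_neg hks, hv]
            by_cases hk2 : k ∈ M
            · simp [hk2]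
            · simp [hk2, hks]
        obtain ⟨h1, h2⟩ := ih (M ++ [String.mk [c]]) _ (hk' ▸ hk) hv'
        exact ⟨h1.trans hk', h2⟩

-- sum of an indicator over a list
theorem sum_indicator (R : List String) : ∀ (L : List String),
    (L.map (fun k => if k ∈ R then (1 : Int) else 0)).sum =
      (L.countP (fun k => decide (k ∈ R)) : Int) := by
  intro L
  induction L with
  | nil => simp
  | cons a l ih =>
    simp only [List.map_cons, List.sum_cons, ih, List.countP_cons]
    by_cases h : a ∈ R <;> simp [h] <;> push_cast <;> ring

theorem countP_mem_eq_length (R L : List String) (hR : R.Nodup) (hL : L.Nodup)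
    (hsub : ∀ x ∈ R, x ∈ L) :
    L.countP (fun k => decide (k ∈ R)) = R.length := by
  rw [List.countP_eq_length_filter]
  have hperm : List.Perm (L.filter (fun k => decide (k ∈ R))) R := by
    rw [List.perm_ext_iff_of_nodup (hL.filter _) hR]
    intro a
    simp only [List.mem_filter, decide_eq_true_eq]
    exact ⟨fun h => h.2, fun h => ⟨hsub a h, h⟩⟩
  exact hperm.length_eq

-- nodup subset of equal length has the same members
theorem mem_of_subset_len (R L : List String) (hR : R.Nodup)
    (hsub : ∀ x ∈ R, x ∈ L) (hlen : L.length ≤ R.length) : ∀ x, x ∈ L → x ∈ R := by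
  have hsp : List.Subperm R L := hR.subperm hsub
  have : List.Perm R L := hsp.perm_of_length_le hlen
  intro x hx
  exact this.mem_iff.mpr hx

-- per-word condition equivalence: A's sum test ⟺ B's prefix-set test
theorem cond_iff (spell : List String) (w : List Char) :
    ((solutionInner spell (spell.foldl (fun d s => d.insert s (0 : Int)) PySem.Dict.empty) w).values.sum
        = (spell.length : Int)) ↔
    ((PySem.Set.ofList spell).length = spell.length ∧ spell.length ≤ w.length ∧
      PySem.Set.equal (PySem.Set.ofList ((w.take spell.length).map (fun c => String.mk [c])))
        (PySem.Set.ofList spell) = true) := by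
  have hkeys : (spell.foldl (fun d s => d.insert s (0 : Int)) PySem.Dict.empty).keys
      = PySem.Set.ofList spell := by
    rw [PySem.Dict.keys_foldl_insert spell (fun _ _ => (0 : Int)) PySem.Dict.empty,
      PySem.Dict.keys_empty, PySem.Set.update_nil_left]
  have hv0 : ∀ k, (spell.foldl (fun d s => d.insert s (0 : Int)) PySem.Dict.empty).getD k 0
      = if k ∈ ([] : List String) then (1 : Int) else 0 := by
    intro k
    rw [check_getD spell PySem.Dict.empty (fun k' => PySem.Dict.getD_empty k' 0) k]
    simp
  obtain ⟨hK, hV⟩ := solutionInner_spec spell w [] _ hkeys hv0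
  have hRnodup : (gp spell [] w).Nodup := gp_nodup spell [] w (by simp)
  have hRsub : ∀ x ∈ gp spell [] w, x ∈ PySem.Set.ofList spell := fun x hx =>
    (PySem.Set.mem_ofList _ _).mpr ((gp_mem spell [] w x hx).resolve_left (by simp))
  have hvals : (solutionInner spell (spell.foldl (fun d s => d.insert s (0 : Int)) PySem.Dict.empty) w).values
      = (PySem.Set.ofList spell).map (fun k => if k ∈ gp spell [] w then (1 : Int) else 0) := by
    rw [PySem.Dict.values_eq_map_keys _ (by rw [hK, hkeys]; exact PySem.Set.nodup_ofList spell) 0,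
      hK, hkeys]
    exact List.map_congr_left (fun k _ => hV k)
  have hsum : (solutionInner spell (spell.foldl (fun d s => d.insert s (0 : Int)) PySem.Dict.empty) w).values.sum
      = ((gp spell [] w).length : Int) := by
    rw [hvals, sum_indicator,
      countP_mem_eq_length (gp spell [] w) _ hRnodup (PySem.Set.nodup_ofList spell) hRsub]
  rw [hsum, Nat.cast_inj]
  have hm : (PySem.Set.ofList spell).length ≤ spell.length := PySem.Set.length_ofList_le spell
  constructor
  · intro h
    obtain ⟨k, hkle, hRe⟩ := gp_prefix spell w []
    simp only [List.nil_append] at hRe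
    have hklen : (gp spell [] w).length = k := by
      rw [hRe, List.length_map, List.length_take]
      omega
    have hkn : k = spell.length := by omega
    have hle : spell.length ≤ (PySem.Set.ofList spell).length := by
      have := (hRnodup.subperm hRsub).length_le
      omega
    have hmn : (PySem.Set.ofList spell).length = spell.length := by omega
    refine ⟨hmn, by omega, ?_⟩
    have hP : (w.take spell.length).map (fun c => String.mk [c]) = gp spell [] w := by
      rw [hRe, hkn]
    rw [PySem.Set.equal_iff]
    intro x
    rw [PySem.Set.mem_ofList, PySem.Set.mem_ofList, hP]
    constructor
    · intro hx
      exact (gp_mem spell [] w x hx).resolve_left (by simp)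
    · intro hx
      exact mem_of_subset_len (gp spell [] w) (PySem.Set.ofList spell) hRnodup hRsub
        (by omega) x ((PySem.Set.mem_ofList _ _).mpr hx)
  · rintro ⟨hmn, hwlen, hEq⟩
    have hmemP : ∀ x, x ∈ (w.take spell.length).map (fun c => String.mk [c]) ↔ x ∈ spell := by
      intro x
      have := (PySem.Set.equal_iff _ _).mp hEq x
      rw [PySem.Set.mem_ofList, PySem.Set.mem_ofList] at this
      exact this
    have hPlen : ((w.take spell.length).map (fun c => String.mk [c])).length = spell.length := by
      rw [List.length_map, List.length_take]
      omega
    have hPnodup : ((w.take spell.length).map (fun c => String.mk [c])).Nodup := by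
      have hperm : List.Perm (PySem.Set.ofList ((w.take spell.length).map (fun c => String.mk [c])))
          (PySem.Set.ofList spell) := by
        rw [List.perm_ext_iff_of_nodup (PySem.Set.nodup_ofList _) (PySem.Set.nodup_ofList _)]
        intro a
        rw [PySem.Set.mem_ofList, PySem.Set.mem_ofList, hmemP a]
      have hlen1 : (PySem.Set.ofList ((w.take spell.length).map (fun c => String.mk [c]))).length
          = spell.length := by rw [hperm.length_eq]; omega
      have hsp : List.Subperm (PySem.Set.ofList ((w.take spell.length).map (fun c => String.mk [c])))
          ((w.take spell.length).map (fun c => String.mk [c])) :=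
        (PySem.Set.nodup_ofList _).subperm (fun x hx => (PySem.Set.mem_ofList _ _).mp hx)
      have hperm2 := hsp.perm_of_length_le (by omega)
      exact hperm2.symm.nodup_iff.mpr (PySem.Set.nodup_ofList _)
    have hgpw : gp spell [] w = (w.take spell.length).map (fun c => String.mk [c]) := by
      conv_lhs => rw [← List.take_append_drop spell.length w]
      rw [gp_run spell (w.take spell.length) (w.drop spell.length) []
        (fun c hc => (hmemP (String.mk [c])).mp (List.mem_map_of_mem hc))
        (by simpa using hPnodup)]
      simp only [List.nil_append]
      exact gp_stuck spell _ _ (fun s hs => (hmemP s).mpr hs)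
    rw [hgpw]
    omega

-- fold lemmas for the outer loop
theorem foldl_if_iff (p q : String → Prop) [DecidablePred p] [DecidablePred q]
    (l : List String) : ∀ (a : Int), (∀ w ∈ l, p w ↔ q w) →
    l.foldl (fun ans w => if p w then (1 : Int) else ans) a =
    l.foldl (fun ans w => if q w then (1 : Int) else ans) a := by
  induction l with
  | nil => intro a _; rfl
  | cons x l ih =>
    intro a h
    simp only [List.foldl_cons]
    have hx := h x (by simp)
    by_cases hp : p x
    · rw [if_pos hp, if_pos (hx.mp hp)]; exact ih _ (fun w hw => h w (by simp [hw]))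
    · rw [if_neg hp, if_neg (fun hq => hp (hx.mpr hq))]; exact ih _ (fun w hw => h w (by simp [hw]))

theorem foldl_if_false (p : String → Prop) [DecidablePred p]
    (l : List String) : ∀ (a : Int), (∀ w ∈ l, ¬ p w) →
    l.foldl (fun ans w => if p w then (1 : Int) else ans) a = a := by
  induction l with
  | nil => intro a _; rfl
  | cons x l ih =>
    intro a h
    simp only [List.foldl_cons, if_neg (h x (by simp))]
    exact ih _ (fun w hw => h w (by simp [hw]))

-- ===== VERDICT (by name: the statement is the Claim_ definition above) =====
theorem solution_spec : Claim_equal_solution := by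
  intro spell dic _
  unfold Spec_solution solution solution_alt
  by_cases hlen : (PySem.Set.ofList spell).length = spell.length
  · rw [if_neg (by simpa using hlen)]
    refine foldl_if_iff _ _ dic 2 (fun w _ => ?_)
    rw [cond_iff spell w.toList]
    constructor
    · rintro ⟨_, h2, h3⟩; exact ⟨h2, h3⟩
    · rintro ⟨h2, h3⟩; exact ⟨hlen, h2, h3⟩
  · rw [if_pos (by simpa using hlen)]
    refine foldl_if_false _ dic 2 (fun w _ => ?_)
    rw [cond_iff spell w.toList]
    rintro ⟨h1, _⟩
    exact hlen h1
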